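-- pv_equiv track=rewrite | github.com/guinho0/Fun-es-lvps-Prog-1 | fun 7/f.py | f_qp
-- ===== SOURCE A (Python) =====
-- def f_qp(n):
--   j = (n//2)+1
--   for i in range(1,j+1):
--     if(n > i**2):
--       d = n-i**2
--     else:
--       d = i**2-n
--     if (i == 1):
--       dif = d
--       q = i
--     elif(d < dif):
--       dif = d
--       q = i
--   return q
-- ===== SOURCE B (Python) =====
-- def f_qp(n):
--     # integer square root by binary search: invariant lo*lo <= n < hi*hi
--     lo, hi = 0, n + 1
--     while hi - lo > 1:
--         mid = (lo + hi) // 2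
--         if mid * mid <= n:
--             lo = mid
--         else:
--             hi = mid
--     r = lo
--     j = n // 2 + 1
--     c1 = min(max(r, 1), j)
--     c2 = min(max(r + 1, 1), j)
--     if abs(c2 * c2 - n) < abs(c1 * c1 - n):
--         return c2
--     return c1
-- ===== Notes on version B (the rewrite author's own statement) =====
-- stated objective: faster
-- what changed: Replaces the linear scan of all i in 1..n//2+1 with a binary-search integer square root and an O(1) comparison of the two clamped candidates isqrt(n) and isqrt(n)+1.
import Mathlib
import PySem

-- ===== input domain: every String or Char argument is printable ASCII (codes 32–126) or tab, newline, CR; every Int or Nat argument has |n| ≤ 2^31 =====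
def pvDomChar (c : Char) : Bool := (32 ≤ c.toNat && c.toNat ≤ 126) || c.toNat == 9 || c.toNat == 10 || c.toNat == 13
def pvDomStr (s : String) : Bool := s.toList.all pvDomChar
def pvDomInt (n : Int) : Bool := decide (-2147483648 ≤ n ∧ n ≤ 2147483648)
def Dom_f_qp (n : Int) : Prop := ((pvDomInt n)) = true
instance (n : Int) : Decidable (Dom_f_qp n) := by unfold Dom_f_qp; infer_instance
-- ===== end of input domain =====

-- B replaces A's linear scan over 1..n//2+1 by a binary-search integer square root
-- plus an O(1) comparison of the two clamped candidates r and r+1 (objective: faster).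

-- ===== PORT A =====
-- loop body of A (d computed, then the i==1 / d<dif update), state = (dif, q)
def pvStepA (n : Int) (st : Int × Int) (i : Int) : Int × Int :=
  let d := if n > i^2 then n - i^2 else i^2 - n
  if i = 1 then (d, i) else if d < st.1 then (d, i) else st

def f_qp (n : Int) : Int :=
  let j := PySem.Int.floordiv n 2 + 1
  -- (dif, q) start as a dummy (0, 0): Python leaves them unbound; under Pre_ the
  -- first iteration has i = 1 and overwrites the state unconditionally.
  ((PySem.List.pyRange 1 (j + 1) 1).foldl (pvStepA n) (0, 0)).2

-- ===== PORT B =====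
-- the while-loop of Source B's binary-search isqrt (all values are nonnegative under Pre_,
-- so the loop is transliterated over Nat; Nat '/' is Python's '//' on nonnegatives)
def pvIsqrtLoop (n lo hi : Nat) : Nat :=
  if hi - lo > 1 then
    if ((lo + hi) / 2) * ((lo + hi) / 2) ≤ n then pvIsqrtLoop n ((lo + hi) / 2) hi
    else pvIsqrtLoop n lo ((lo + hi) / 2)
  else lo
termination_by hi - lo
decreasing_by all_goals omega

def f_qp_alt (n : Int) : Int :=
  let r : Int := (pvIsqrtLoop n.toNat 0 (n.toNat + 1) : Nat)
  let j := PySem.Int.floordiv n 2 + 1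
  let c1 := min (max r 1) j
  let c2 := min (max (r + 1) 1) j
  if |c2 * c2 - n| < |c1 * c1 - n| then c2 else c1

-- ===== PRECONDITION & SPEC =====
-- Pre_ excludes exactly n < 0, where A's loop body never runs and A raises UnboundLocalError.
def Pre_f_qp (n : Int) : Prop := 0 ≤ n
instance (n : Int) : Decidable (Pre_f_qp n) := by unfold Pre_f_qp; infer_instance
def pvWitness_f_qp : Int := 7

def Spec_f_qp (n : Int) (out : Int) : Prop := out = f_qp_alt n
instance (n : Int) (out : Int) : Decidable (Spec_f_qp n out) := by unfold Spec_f_qp; infer_instance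

-- ===== CLAIM (what is proved, stated in full; the proofs are below) =====
def Claim_equal_f_qp : Prop := ∀ (n : Int), Dom_f_qp n → Pre_f_qp n → Spec_f_qp n (f_qp n)

-- ===== LEMMAS AND PROOFS =====

-- the distance A computes for index i
def pvG (n i : Int) : Int := if n > i^2 then n - i^2 else i^2 - n

theorem pvG_eq_of_le {n i : Int} (h : i * i ≤ n) : pvG n i = n - i * i := by
  unfold pvG; rw [pow_two]; split <;> omega

theorem pvG_eq_of_ge {n i : Int} (h : n ≤ i * i) : pvG n i = i * i - n := by
  unfold pvG; rw [pow_two]; split <;> omega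

theorem pvG_eq_abs (n c : Int) : |c * c - n| = pvG n c := by
  unfold pvG; rw [pow_two]
  rcases le_or_gt n (c * c) with h | h
  · rw [abs_of_nonneg (by omega)]; omega
  · rw [abs_of_neg (by omega)]; omega

-- characterisation of A's loop state after scanning 1..j: (dif, q) with q the FIRST argmin
def pvPA (n j : Int) (st : Int × Int) : Prop :=
  1 ≤ st.2 ∧ st.2 ≤ j ∧ st.1 = pvG n st.2 ∧
  (∀ i, 1 ≤ i → i ≤ j → st.1 ≤ pvG n i) ∧
  (∀ i, 1 ≤ i → i < st.2 → st.1 < pvG n i)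

theorem pvPA_uniq {n j : Int} {st st' : Int × Int}
    (h : pvPA n j st) (h' : pvPA n j st') : st.2 = st'.2 := by
  obtain ⟨h1, h2, h3, h4, h5⟩ := h
  obtain ⟨h1', h2', h3', h4', h5'⟩ := h'
  rcases lt_trichotomy st.2 st'.2 with hlt | heq | hgt
  · have := h5' st.2 h1 hlt
    have := h4 st'.2 h1' h2'
    omega
  · exact heq
  · have := h5 st'.2 h1' hgt
    have := h4' st.2 h1 h2
    omega

theorem pvFoldA (n : Int) : ∀ (k : Nat), 1 ≤ k →
    pvPA n (k : Int) (((PySem.List.pyRange 1 ((k : Int) + 1) 1)).foldl (pvStepA n) (0, 0)) := by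
  intro k hk
  induction k with
  | zero => omega
  | succ m ih =>
    rcases Nat.eq_or_lt_of_le hk with h1 | h1
    · -- k = 1 : the range is [1]
      have hm : m = 0 := by omega
      subst hm
      rw [show ((1 : Nat) : Int) + 1 = 1 + 1 from by norm_num,
          PySem.List.pyRange_one_singleton]
      simp only [List.foldl, pvStepA]
      refine ⟨by norm_num, by norm_num, ?_, ?_, ?_⟩
      · simp [pvG]
      · intro i hi hij
        have : i = 1 := by omega
        subst this; simp [pvG]
      · intro i hi hij; simp at hij; omega
    · -- k = m+1, m ≥ 1
      have hm : 1 ≤ m := by omega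
      have hrng : PySem.List.pyRange 1 (((m + 1 : Nat) : Int) + 1) 1
          = PySem.List.pyRange 1 ((m : Int) + 1) 1 ++ [(m : Int) + 1] := by
        have := PySem.List.pyRange_one_succ_right (a := 1) (b := (m : Int) + 1) (by omega)
        push_cast
        exact this
      rw [hrng, List.foldl_append]
      obtain ⟨i1, i2, i3, i4, i5⟩ := ih hm
      set st := (PySem.List.pyRange 1 ((m : Int) + 1) 1).foldl (pvStepA n) (0, 0) with hst
      show pvPA n ((m + 1 : Nat) : Int) (pvStepA n st ((m : Int) + 1))
      unfold pvStepA
      have hne : ¬ ((m : Int) + 1 = 1) := by omega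
      rw [if_neg hne]
      by_cases hlt : (if n > ((m : Int) + 1)^2 then n - ((m : Int) + 1)^2
          else ((m : Int) + 1)^2 - n) < st.1
      · rw [if_pos hlt]
        have hd : (if n > ((m : Int) + 1)^2 then n - ((m : Int) + 1)^2
            else ((m : Int) + 1)^2 - n) = pvG n ((m : Int) + 1) := by rfl
        rw [hd] at hlt ⊢
        refine ⟨by omega, by omega, rfl, ?_, ?_⟩
        · intro i hi hij
          rcases le_or_gt i (m : Int) with h | h
          · have := i4 i hi h; omega
          · have : i = (m : Int) + 1 := by push_cast at hij; omega
            subst this; omega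
        · intro i hi hij
          have := i4 i hi (by omega)
          omega
      · rw [if_neg hlt]
        have hd : (if n > ((m : Int) + 1)^2 then n - ((m : Int) + 1)^2
            else ((m : Int) + 1)^2 - n) = pvG n ((m : Int) + 1) := by rfl
        rw [hd] at hlt
        refine ⟨i1, by push_cast at i2 ⊢; omega, i3, ?_, i5⟩
        intro i hi hij
        rcases le_or_gt i (m : Int) with h | h
        · exact i4 i hi h
        · have : i = (m : Int) + 1 := by push_cast at hij; omega
          subst this; omega

-- binary-search invariant: the loop returns r with r*r ≤ n < (r+1)*(r+1)
theorem pvIsqrtLoop_spec (n : Nat) : ∀ (lo hi : Nat), lo * lo ≤ n → n < hi * hi → lo < hi →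
    pvIsqrtLoop n lo hi * pvIsqrtLoop n lo hi ≤ n ∧
    n < (pvIsqrtLoop n lo hi + 1) * (pvIsqrtLoop n lo hi + 1) := by
  intro lo hi
  induction lo, hi using pvIsqrtLoop.induct n with
  | case1 lo hi hgt hle ih =>
    intro h1 h2 h3
    rw [pvIsqrtLoop, if_pos hgt, if_pos hle]
    exact ih hle h2 (by omega)
  | case2 lo hi hgt hle ih =>
    intro h1 h2 h3
    rw [pvIsqrtLoop, if_pos hgt, if_neg hle]
    exact ih h1 (by omega) (by omega)
  | case3 lo hi hgt =>
    intro h1 h2 h3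
    rw [pvIsqrtLoop, if_neg hgt]
    have : hi = lo + 1 := by omega
    subst this
    exact ⟨h1, h2⟩

theorem pvFloordiv_two (n : Int) (_h : 0 ≤ n) : PySem.Int.floordiv n 2 = n / 2 := by
  simp [PySem.Int.floordiv]
  rw [Int.fdiv_eq_ediv]
  simp

-- monotonicity of the distance on the two sides of the square root
theorem pvG_dec (n a b : Int) (h1 : 0 ≤ a) (h2 : a ≤ b) (h3 : b * b ≤ n) :
    pvG n b ≤ pvG n a ∧ (a < b → pvG n b < pvG n a) := by
  have ha : a * a ≤ n := by nlinarith
  rw [pvG_eq_of_le ha, pvG_eq_of_le h3]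
  constructor
  · nlinarith
  · intro hab; nlinarith

theorem pvG_inc (n a b : Int) (h1 : 0 ≤ a) (h2 : a ≤ b) (h3 : n ≤ a * a) :
    pvG n a ≤ pvG n b ∧ (a < b → pvG n a < pvG n b) := by
  have hb : n ≤ b * b := by nlinarith
  rw [pvG_eq_of_ge h3, pvG_eq_of_ge hb]
  constructor
  · nlinarith
  · intro hab; nlinarith

-- B's candidate comparison, abstracted over any r with r*r ≤ n < (r+1)*(r+1)
theorem pvPB_aux (n r j c1 c2 q : Int) (h : 0 ≤ n) (hr0 : 0 ≤ r)
    (hr1 : r * r ≤ n) (hr2 : n < (r + 1) * (r + 1)) (hj : j = n / 2 + 1)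
    (hc1 : c1 = min (max r 1) j) (hc2 : c2 = min (max (r + 1) 1) j)
    (hq : q = if |c2 * c2 - n| < |c1 * c1 - n| then c2 else c1) :
    pvPA n j (pvG n q, q) := by
  rw [pvG_eq_abs, pvG_eq_abs] at hq
  have hj1 : 1 ≤ j := by omega
  have hrj : r ≤ j := by
    rcases le_or_gt r 1 with hA | hA
    · omega
    · have : 2 * r ≤ r * r := by nlinarith
      omega
  rcases eq_or_lt_of_le hr0 with hr00 | hr01
  · -- r = 0, hence n = 0, j = 1, both candidates clamp to 1
    have hn0 : n = 0 := by nlinarith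
    have hjv : j = 1 := by omega
    have hc1' : c1 = 1 := by omega
    have hc2' : c2 = 1 := by omega
    rw [hc1', hc2'] at hq
    simp at hq
    rw [hq]
    refine ⟨by omega, by omega, rfl, ?_, ?_⟩
    · intro i hi hij
      have : i = 1 := by omega
      subst this; exact le_refl _
    · intro i hi hij; omega
  · -- r ≥ 1 : c1 = r
    have hc1' : c1 = r := by omega
    rcases le_or_gt (r + 1) j with hBj | hBj
    · -- both r and r+1 lie in the scanned range
      have hc2' : c2 = r + 1 := by omega
      rw [hc1', hc2'] at hq
      rcases lt_or_ge (pvG n (r + 1)) (pvG n r) with hlt | hge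
      · rw [if_pos hlt] at hq
        rw [hq]
        refine ⟨by omega, by omega, rfl, ?_, ?_⟩
        · intro i hi hij
          rcases le_or_gt i r with hcase | hcase
          · have := (pvG_dec n i r (by omega) hcase hr1).1
            linarith
          · have := (pvG_inc n (r + 1) i (by omega) (by omega) (le_of_lt hr2)).1
            linarith
        · intro i hi hij
          have := (pvG_dec n i r (by omega) (by omega) hr1).1
          linarith
      · rw [if_neg (by omega)] at hq
        rw [hq]
        refine ⟨by omega, by omega, rfl, ?_, ?_⟩
        · intro i hi hij
          rcases le_or_gt i r with hcase | hcase
          · exact (pvG_dec n i r (by omega) hcase hr1).1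
          · have := (pvG_inc n (r + 1) i (by omega) (by omega) (le_of_lt hr2)).1
            linarith
        · intro i hi hij
          exact (pvG_dec n i r (by omega) (by omega) hr1).2 hij
    · -- the range ends at j = r : both candidates clamp to r
      have hjr : j = r := by omega
      have hc2' : c2 = r := by omega
      rw [hc1', hc2'] at hq
      simp at hq
      rw [hq]
      refine ⟨by omega, by omega, rfl, ?_, ?_⟩
      · intro i hi hij
        exact (pvG_dec n i r (by omega) (by omega) hr1).1
      · intro i hi hij
        exact (pvG_dec n i r (by omega) (by omega) hr1).2 hij

-- B's result satisfies the same first-argmin characterisation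
theorem pvPB (n : Int) (h : 0 ≤ n) :
    pvPA n (PySem.Int.floordiv n 2 + 1) (pvG n (f_qp_alt n), f_qp_alt n) := by
  obtain ⟨s1, s2⟩ := pvIsqrtLoop_spec n.toNat 0 (n.toNat + 1) (by simp)
    (by nlinarith) (Nat.succ_pos _)
  have hr1 : ((pvIsqrtLoop n.toNat 0 (n.toNat + 1) : Nat) : Int) *
      ((pvIsqrtLoop n.toNat 0 (n.toNat + 1) : Nat) : Int) ≤ n := by
    rw [← Int.toNat_of_nonneg h]
    exact_mod_cast s1
  have hr2 : n < (((pvIsqrtLoop n.toNat 0 (n.toNat + 1) : Nat) : Int) + 1) *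
      (((pvIsqrtLoop n.toNat 0 (n.toNat + 1) : Nat) : Int) + 1) := by
    rw [← Int.toNat_of_nonneg h]
    exact_mod_cast s2
  exact pvPB_aux n _ _ _ _ (f_qp_alt n) h (Int.natCast_nonneg _) hr1 hr2
    (by rw [pvFloordiv_two n h]) rfl rfl rfl

-- ===== VERDICT (by name: the statement is the Claim_ definition above) =====
theorem f_qp_spec : Claim_equal_f_qp := by
  intro n hdom hpre
  unfold Spec_f_qp
  have hn : (0 : Int) ≤ n := hpre
  have hj1 : 1 ≤ PySem.Int.floordiv n 2 + 1 := by
    rw [pvFloordiv_two n hn]; omega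
  set j := PySem.Int.floordiv n 2 + 1 with hj
  have hk : j = ((j.toNat : Nat) : Int) := by omega
  have hA : pvPA n j ((PySem.List.pyRange 1 (j + 1) 1).foldl (pvStepA n) (0, 0)) := by
    rw [hk]
    exact pvFoldA n j.toNat (by omega)
  have hB := pvPB n hpre
  rw [← hj] at hB
  have := pvPA_uniq hA hB
  simp only [f_qp]
  rw [← hj]
  exact this
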